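-- pv_equiv track=rewrite | github.com/jburke11/Projects | Python/proj09.py | top_methods_by_sector
-- ===== SOURCE A (Python) =====
-- def top_methods_by_sector(dictionary):
--     methods_dict = {}
--     for x,y in dictionary.items():
--         for entity in y:
--             for year, methods in entity[1].items(): # takes the second dict from original dict
--                 if methods[0] not in methods_dict:
--                     methods_dict[methods[0]] = {}   # initialize dict
--                 if methods[1] not in methods_dict[methods[0]]:
--                     methods_dict[methods[0]][methods[1]] = 1    # initialize count
--                 else :
--                     methods_dict[methods[0]][methods[1]] += 1 # add 1 for every occurance
--     return methods_dict
--     pass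
-- ===== SOURCE B (Python) =====
-- def top_methods_by_sector(dictionary):
--     pairs = [(methods[0], methods[1])
--              for entities in dictionary.values()
--              for entity in entities
--              for methods in entity[1].values()]
--     groups = {}
--     for t, k in pairs:
--         groups.setdefault(t, []).append(k)
--     return {t: {k: ks.count(k) for k in dict.fromkeys(ks)}
--             for t, ks in groups.items()}
-- ===== Notes on version B (the rewrite author's own statement) =====
-- stated objective: alternative
-- what changed: A builds the nested dict incrementally with per-pair membership tests and in-place counter updates; B first flattens everything to a list of (type, key) pairs, groups the keys per type, and then builds the whole result in one reshaping comprehension counting each distinct key.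
import Mathlib
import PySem

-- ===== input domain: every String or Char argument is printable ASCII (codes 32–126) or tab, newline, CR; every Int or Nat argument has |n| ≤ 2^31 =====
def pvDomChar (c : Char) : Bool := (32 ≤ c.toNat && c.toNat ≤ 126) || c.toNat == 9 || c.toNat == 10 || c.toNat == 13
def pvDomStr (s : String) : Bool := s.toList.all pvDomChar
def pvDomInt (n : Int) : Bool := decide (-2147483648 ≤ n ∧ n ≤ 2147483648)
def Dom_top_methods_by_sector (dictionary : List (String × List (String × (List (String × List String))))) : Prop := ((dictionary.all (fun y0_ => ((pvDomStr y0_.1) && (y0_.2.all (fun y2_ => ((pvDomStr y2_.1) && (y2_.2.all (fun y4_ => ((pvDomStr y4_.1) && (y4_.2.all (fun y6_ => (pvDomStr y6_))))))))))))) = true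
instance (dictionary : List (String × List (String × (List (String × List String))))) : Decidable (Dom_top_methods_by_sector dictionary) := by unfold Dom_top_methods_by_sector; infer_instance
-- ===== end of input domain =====

-- B replaces A's incremental nested-dict build by flatten-to-pairs, group-by-type, then one reshaping count pass (alternative decomposition, not faster).

-- ===== PORT A =====
def top_methods_by_sector (dictionary : List (String × List (String × (List (String × List String))))) : List (String × List (String × Int)) :=
  let methods_dict : PySem.Dict String (PySem.Dict String Int) :=
    dictionary.foldl (fun md xy =>
      xy.2.foldl (fun md entity =>
        entity.2.foldl (fun md ym =>
          match ym.2 with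
          | m0 :: m1 :: _ =>
            let md := if md.contains m0 then md else md.insert m0 PySem.Dict.empty
            if !((md.getD m0 PySem.Dict.empty).contains m1) then
              md.insert m0 ((md.getD m0 PySem.Dict.empty).insert m1 1)
            else
              md.insert m0 ((md.getD m0 PySem.Dict.empty).insert m1 ((md.getD m0 PySem.Dict.empty).getD m1 0 + 1))
          | _ => md   -- methods[0]/methods[1] raises IndexError in Python; excluded by Pre_
        ) md) md) PySem.Dict.empty
  methods_dict.items.map (fun p => (p.1, p.2.items))

-- ===== PORT B =====
def top_methods_by_sector_alt (dictionary : List (String × List (String × (List (String × List String))))) : List (String × List (String × Int)) :=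
  let pairs : List (String × String) :=
    dictionary.flatMap (fun xy => xy.2.flatMap (fun entity =>
      entity.2.filterMap (fun ym =>
        (PySem.List.pyGet? ym.2 0).bind (fun m0 =>
          (PySem.List.pyGet? ym.2 1).map (fun m1 => (m0, m1))))))
          -- pyGet? = Python indexing; none = the comprehension's IndexError, excluded by Pre_
  let groups : PySem.Dict String (List String) :=
    pairs.foldl (fun g p => g.modify p.1 [] (fun ks => ks ++ [p.2])) PySem.Dict.empty
  groups.items.map (fun tks =>
    (tks.1, (PySem.Set.ofList tks.2).map (fun k => (k, (tks.2.count k : Int)))))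

-- ===== PRECONDITION & SPEC =====
-- Pre_ excludes exactly the inputs where some methods list has fewer than 2 elements, on which Python A raises IndexError.
def Pre_top_methods_by_sector (dictionary : List (String × List (String × (List (String × List String))))) : Prop :=
  (dictionary.all (fun xy => xy.2.all (fun entity => entity.2.all (fun ym => 2 ≤ ym.2.length)))) = true
instance (dictionary : List (String × List (String × (List (String × List String))))) : Decidable (Pre_top_methods_by_sector dictionary) := by unfold Pre_top_methods_by_sector; infer_instance

def pvWitness_top_methods_by_sector : (List (String × List (String × (List (String × List String))))) :=
  [("sector", [("entity", [("2020", ["typeA", "m1"]), ("2021", ["typeA", "m1", "x"])])])]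

def Spec_top_methods_by_sector (dictionary : List (String × List (String × (List (String × List String))))) (out : List (String × List (String × Int))) : Prop := out = top_methods_by_sector_alt dictionary
instance (dictionary : List (String × List (String × (List (String × List String))))) (out : List (String × List (String × Int))) : Decidable (Spec_top_methods_by_sector dictionary out) := by unfold Spec_top_methods_by_sector; infer_instance

-- ===== CLAIM (what is proved, stated in full; the proofs are below) =====
def Claim_equal_top_methods_by_sector : Prop := ∀ (dictionary : List (String × List (String × (List (String × List String))))), Dom_top_methods_by_sector dictionary → Pre_top_methods_by_sector dictionary → Spec_top_methods_by_sector dictionary (top_methods_by_sector dictionary)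

-- ===== LEMMAS AND PROOFS =====

-- A's per-pair update, in closed form
def pvStep2 (d : PySem.Dict String (PySem.Dict String Int)) (p : String × String) : PySem.Dict String (PySem.Dict String Int) :=
  d.modify p.1 PySem.Dict.empty (fun i => i.insert p.2 (i.getD p.2 0 + 1))

-- the flattening both ports walk
def pvMFn (ym : String × List String) : Option (String × String) :=
  (PySem.List.pyGet? ym.2 0).bind (fun m0 =>
    (PySem.List.pyGet? ym.2 1).map (fun m1 => (m0, m1)))

lemma pvStepA_eq (d : PySem.Dict String (PySem.Dict String Int)) (m0 m1 : String) (_rest : List String) :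
    (let md := if d.contains m0 then d else d.insert m0 PySem.Dict.empty
     if !((md.getD m0 PySem.Dict.empty).contains m1) then
       md.insert m0 ((md.getD m0 PySem.Dict.empty).insert m1 1)
     else
       md.insert m0 ((md.getD m0 PySem.Dict.empty).insert m1 ((md.getD m0 PySem.Dict.empty).getD m1 0 + 1)))
    = pvStep2 d (m0, m1) := by
  simp only [pvStep2, PySem.Dict.modify]
  by_cases h : d.contains m0 = true
  · simp only [h, if_true]
    by_cases h2 : (d.getD m0 PySem.Dict.empty).contains m1 = true
    · simp [h2]
    · simp only [Bool.not_eq_true] at h2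
      rw [PySem.Dict.getD_of_not_contains _ _ h2]
      simp [h2]
  · simp only [Bool.not_eq_true] at h
    simp only [h, Bool.false_eq_true, if_false]
    rw [PySem.Dict.getD_insert_self, PySem.Dict.getD_of_not_contains _ _ h]
    simp [PySem.Dict.contains_empty, PySem.Dict.insert_insert_self, PySem.Dict.getD_empty]

lemma pvInnerFold (yd : List (String × List String)) (d : PySem.Dict String (PySem.Dict String Int)) :
    yd.foldl (fun md ym =>
      match ym.2 with
      | m0 :: m1 :: _ =>
        let md := if md.contains m0 then md else md.insert m0 PySem.Dict.empty
        if !((md.getD m0 PySem.Dict.empty).contains m1) then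
          md.insert m0 ((md.getD m0 PySem.Dict.empty).insert m1 1)
        else
          md.insert m0 ((md.getD m0 PySem.Dict.empty).insert m1 ((md.getD m0 PySem.Dict.empty).getD m1 0 + 1))
      | _ => md) d
    = (yd.filterMap pvMFn).foldl pvStep2 d := by
  induction yd generalizing d with
  | nil => rfl
  | cons ym tl ih =>
    rcases ym with ⟨y, ms⟩
    match ms with
    | [] =>
      have hm : pvMFn (y, ([] : List String)) = none := by
        simp [pvMFn, PySem.List.pyGet?, PySem.List.pyIdx?]
      simpa [List.filterMap_cons, hm] using ih d
    | [m0] =>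
      have hm : pvMFn (y, [m0]) = none := by
        simp [pvMFn, PySem.List.pyGet?, PySem.List.pyIdx?]
      simpa [List.filterMap_cons, hm] using ih d
    | m0 :: m1 :: rest =>
      have hm : pvMFn (y, m0 :: m1 :: rest) = some (m0, m1) := by simp [pvMFn]
      simp only [List.foldl_cons, List.filterMap_cons, hm]
      rw [← pvStepA_eq d m0 m1 rest]
      exact ih _

lemma pvMidFold (es : List (String × (List (String × List String)))) (d : PySem.Dict String (PySem.Dict String Int)) :
    es.foldl (fun md entity => (entity.2.filterMap pvMFn).foldl pvStep2 md) d
    = (es.flatMap (fun e => e.2.filterMap pvMFn)).foldl pvStep2 d := by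
  induction es generalizing d with
  | nil => rfl
  | cons e tl ih => simp [List.flatMap_cons, List.foldl_append, ih]

lemma pvOuterFold (l : List (String × List (String × (List (String × List String))))) (d : PySem.Dict String (PySem.Dict String Int)) :
    l.foldl (fun md xy => (xy.2.flatMap (fun e => e.2.filterMap pvMFn)).foldl pvStep2 md) d
    = (l.flatMap (fun xy => xy.2.flatMap (fun e => e.2.filterMap pvMFn))).foldl pvStep2 d := by
  induction l generalizing d with
  | nil => rfl
  | cons x tl ih => simp [List.flatMap_cons, List.foldl_append, ih]

-- getD of A's fold is a per-type counting fold
lemma pvNG (ps : List (String × String)) (d : PySem.Dict String (PySem.Dict String Int)) (t : String) :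
    (ps.foldl pvStep2 d).getD t PySem.Dict.empty
    = ((ps.filter (fun p => p.1 == t)).map (·.2)).foldl
        (fun i m1 => i.insert m1 (i.getD m1 0 + 1)) (d.getD t PySem.Dict.empty) := by
  induction ps generalizing d with
  | nil => rfl
  | cons p tl ih =>
    simp only [List.foldl_cons, ih, List.filter_cons]
    by_cases h : p.1 = t
    · simp [h, pvStep2]
    · have hb : (p.1 == t) = false := beq_false_of_ne h
      rw [pvStep2, PySem.Dict.getD_modify]
      rw [if_neg (fun hh => h hh.symm)]
      simp [hb]

theorem pv_main (dictionary : List (String × List (String × (List (String × List String))))) :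
    top_methods_by_sector dictionary = top_methods_by_sector_alt dictionary := by
  simp only [top_methods_by_sector, top_methods_by_sector_alt]
  set pairs : List (String × String) :=
    dictionary.flatMap (fun xy => xy.2.flatMap (fun entity => entity.2.filterMap (fun ym =>
      (PySem.List.pyGet? ym.2 0).bind (fun m0 =>
        (PySem.List.pyGet? ym.2 1).map (fun m1 => (m0, m1)))))) with hpairs
  have hpairs' : pairs = dictionary.flatMap (fun xy => xy.2.flatMap (fun e => e.2.filterMap pvMFn)) := by
    rw [hpairs]; rfl
  -- A's nested folds are a single fold of pvStep2 over pairs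
  have hA : dictionary.foldl (fun md xy =>
      xy.2.foldl (fun md entity =>
        entity.2.foldl (fun md ym =>
          match ym.2 with
          | m0 :: m1 :: _ =>
            let md := if md.contains m0 then md else md.insert m0 PySem.Dict.empty
            if !((md.getD m0 PySem.Dict.empty).contains m1) then
              md.insert m0 ((md.getD m0 PySem.Dict.empty).insert m1 1)
            else
              md.insert m0 ((md.getD m0 PySem.Dict.empty).insert m1 ((md.getD m0 PySem.Dict.empty).getD m1 0 + 1))
          | _ => md) md) md) (PySem.Dict.empty : PySem.Dict String (PySem.Dict String Int))
      = pairs.foldl pvStep2 PySem.Dict.empty := by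
    have e1 : (fun (md : PySem.Dict String (PySem.Dict String Int)) (xy : String × List (String × (List (String × List String)))) =>
        xy.2.foldl (fun md entity =>
          entity.2.foldl (fun md ym =>
            match ym.2 with
            | m0 :: m1 :: _ =>
              let md := if md.contains m0 then md else md.insert m0 PySem.Dict.empty
              if !((md.getD m0 PySem.Dict.empty).contains m1) then
                md.insert m0 ((md.getD m0 PySem.Dict.empty).insert m1 1)
              else
                md.insert m0 ((md.getD m0 PySem.Dict.empty).insert m1 ((md.getD m0 PySem.Dict.empty).getD m1 0 + 1))
            | _ => md) md) md)
        = (fun md xy => (xy.2.flatMap (fun e => e.2.filterMap pvMFn)).foldl pvStep2 md) := by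
      funext md xy
      calc xy.2.foldl _ md
          = xy.2.foldl (fun md entity => (entity.2.filterMap pvMFn).foldl pvStep2 md) md := by
            congr 1
            funext md e
            exact pvInnerFold e.2 md
        _ = (xy.2.flatMap (fun e => e.2.filterMap pvMFn)).foldl pvStep2 md := pvMidFold xy.2 md
    rw [e1, pvOuterFold, ← hpairs']
  rw [hA]
  -- keys and lookups of both final dicts
  have hndA : (pairs.foldl pvStep2 PySem.Dict.empty).keys.Nodup :=
    PySem.Dict.nodup_keys_foldl_modify_key pairs Prod.fst PySem.Dict.empty
      (fun _ p => fun i => i.insert p.2 (i.getD p.2 0 + 1)) PySem.Dict.empty (by simp [PySem.Dict.keys_empty])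
  have hkA : (pairs.foldl pvStep2 PySem.Dict.empty).keys = PySem.Set.ofList (pairs.map Prod.fst) := by
    have := PySem.Dict.keys_foldl_modify_key pairs Prod.fst PySem.Dict.empty
      (fun (_ : PySem.Dict String (PySem.Dict String Int)) p => fun i => i.insert p.2 (i.getD p.2 0 + 1)) PySem.Dict.empty
    unfold pvStep2
    simpa [PySem.Dict.keys_empty, PySem.Set.update_nil_left] using this
  set G : PySem.Dict String (List String) :=
    pairs.foldl (fun g p => g.modify p.1 [] (fun ks => ks ++ [p.2])) PySem.Dict.empty with hG
  have hndB : G.keys.Nodup :=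
    PySem.Dict.nodup_keys_foldl_modify_key pairs Prod.fst []
      (fun _ p => fun ks => ks ++ [p.2]) PySem.Dict.empty (by simp [PySem.Dict.keys_empty])
  have hkB : G.keys = PySem.Set.ofList (pairs.map Prod.fst) := by
    have := PySem.Dict.keys_foldl_modify_key pairs Prod.fst ([] : List String)
      (fun _ p => fun ks => ks ++ [p.2]) PySem.Dict.empty
    simpa [PySem.Dict.keys_empty, PySem.Set.update_nil_left] using this
  have hgB : ∀ t, G.getD t [] = (pairs.filter (fun p => p.1 == t)).map (·.2) := by
    intro t
    simpa [PySem.Dict.getD_empty] using PySem.Dict.getD_foldl_modify_append pairs PySem.Dict.empty t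
  rw [PySem.Dict.items_eq_map_keys _ hndA PySem.Dict.empty,
      PySem.Dict.items_eq_map_keys _ hndB []]
  rw [hkA, hkB, List.map_map, List.map_map]
  refine List.map_congr_left fun t _ => ?_
  simp only [Function.comp]
  have hcnt : (pairs.foldl pvStep2 PySem.Dict.empty).getD t PySem.Dict.empty
      = PySem.Dict.counter ((pairs.filter (fun p => p.1 == t)).map (·.2)) := by
    rw [pvNG, PySem.Dict.getD_empty, PySem.Dict.foldl_insert_getD_add_one_eq_counter]
  rw [hcnt, PySem.Dict.items_counter, hgB t]

-- ===== VERDICT (by name: the statement is the Claim_ definition above) =====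
theorem top_methods_by_sector_spec : Claim_equal_top_methods_by_sector := by
  intro dictionary _ _
  unfold Spec_top_methods_by_sector
  exact pv_main dictionary
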